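-- pv_equiv track=rewrite | github.com/meurig/AoC2023 | day14/day14.py | tilt_row_left
-- ===== SOURCE A (Python) =====
-- def tilt_row_left(row: str) -> (str, int):
--     result = ''
--     load = 0
--     for i, char in enumerate(row):
--         match char:
--             case 'O':
--                 result += 'O'
--                 load += len(row) - len(result) + 1
--             case '.':
--                 continue
--             case '#':
--                 result += '.'*(i - len(result)) + '#'
--     result += '.' * (len(row) - len(result))
--     return result, load
-- ===== SOURCE B (Python) =====
-- def tilt_row_left(row: str) -> (str, int):
--     n = len(row)
--     pieces = []
--     load = 0
--     base = 0
--     for seg in row.split('#'):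
--         k = seg.count('O')
--         pieces.append('O' * k + '.' * (len(seg) - k))
--         load += k * (n - base) - k * (k - 1) // 2
--         base += len(seg) + 1
--     return '#'.join(pieces), load
-- ===== Notes on version B (the rewrite author's own statement) =====
-- stated objective: simpler
-- what changed: B splits the row on '#' into segments and emits each segment's rocks and dots in one shot ('O'*k + '.'*(len-k)) with the segment's load obtained by a closed arithmetic-series formula, instead of A's character-by-character loop that grows the result string and pads up to each '#' by index arithmetic.
import Mathlib
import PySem

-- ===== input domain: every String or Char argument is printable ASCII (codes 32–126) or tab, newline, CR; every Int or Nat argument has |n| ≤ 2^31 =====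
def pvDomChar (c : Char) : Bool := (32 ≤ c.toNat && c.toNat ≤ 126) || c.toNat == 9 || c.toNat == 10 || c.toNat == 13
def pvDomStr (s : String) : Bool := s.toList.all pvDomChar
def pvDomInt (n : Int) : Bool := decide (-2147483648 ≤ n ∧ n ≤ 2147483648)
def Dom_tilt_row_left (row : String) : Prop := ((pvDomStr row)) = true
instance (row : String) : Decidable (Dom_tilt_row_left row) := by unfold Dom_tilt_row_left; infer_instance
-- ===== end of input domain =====

-- B replaces A's per-character loop by a split-on-'#' segment rewrite with a closed-form
-- per-segment load (objective: simpler).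

-- ===== PORT A =====
-- A's `for i, char in enumerate(row)` loop; state = (result, load), index i carried explicitly.
def tiltLoopA (n : Nat) : List Char → Nat → List Char → Int → List Char × Int
  | [], _, res, load => (res, load)
  | c :: cs, i, res, load =>
    if c = 'O' then
      let res' := res ++ ['O']
      tiltLoopA n cs (i + 1) res' (load + ((n : Int) - (res'.length : Int) + 1))
    else if c = '.' then
      tiltLoopA n cs (i + 1) res load
    else if c = '#' then
      tiltLoopA n cs (i + 1) (res ++ (List.replicate (i - res.length) '.' ++ ['#'])) load
    else
      tiltLoopA n cs (i + 1) res load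

def tilt_row_left (row : String) : String × Int :=
  let cs := row.toList
  let n := cs.length
  let rl := tiltLoopA n cs 0 [] 0
  (String.mk (rl.1 ++ List.replicate (n - rl.1.length) '.'), rl.2)

-- ===== PORT B =====
-- 'O'*k + '.'*(len(seg)-k) for one '#'-free segment.
def segPiece (s : List Char) : List Char :=
  List.replicate (s.count 'O') 'O' ++ List.replicate (s.length - s.count 'O') '.'

def tilt_row_left_alt (row : String) : String × Int :=
  let cs := row.toList
  let n := cs.length
  let segs := cs.splitOn '#'
  let pieces := segs.map segPiece
  -- fold state = (base index of current segment, load so far); per segment with k = seg.count('O'):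
  -- load += k*(n-base) - k*(k-1)//2, base += len(seg)+1  (as in Source B)
  let bl := segs.foldl
    (fun (st : Int × Int) s =>
      (st.1 + (s.length : Int) + 1,
       st.2 + ((s.count 'O' : Int) * ((n : Int) - st.1)
         - PySem.Int.floordiv ((s.count 'O' : Int) * ((s.count 'O' : Int) - 1)) 2)))
    ((0 : Int), (0 : Int))
  (String.mk (List.intercalate ['#'] pieces), bl.2)

-- ===== PRECONDITION & SPEC =====
def Spec_tilt_row_left (row : String) (out : String × Int) : Prop := out = tilt_row_left_alt row
instance (row : String) (out : String × Int) : Decidable (Spec_tilt_row_left row out) := by unfold Spec_tilt_row_left; infer_instance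

-- ===== CLAIM (what is proved, stated in full; the proofs are below) =====
def Claim_equal_tilt_row_left : Prop := ∀ (row : String), Dom_tilt_row_left row → Spec_tilt_row_left row (tilt_row_left row)

-- ===== LEMMAS AND PROOFS =====

-- Sum of (n - (b+j)) over the k rocks of a segment whose output starts at position b.
def loadOf (n b : Nat) : Nat → Int
  | 0 => 0
  | k + 1 => ((n : Int) - (b : Int)) + loadOf n (b + 1) k

def loadSegs (n : Nat) : Nat → List (List Char) → Int
  | _, [] => 0
  | b, s :: ss => loadOf n b (s.count 'O') + loadSegs n (b + s.length + 1) ss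

lemma loadOf_closed (n : Nat) : ∀ (k b : Nat),
    loadOf n b k = (k : Int) * ((n : Int) - (b : Int))
      - PySem.Int.floordiv ((k : Int) * ((k : Int) - 1)) 2 := by
  intro k
  induction k with
  | zero =>
    intro b
    rw [PySem.Int.floordiv_eq_ediv_of_pos (by norm_num)]
    simp [loadOf]
  | succ k ih =>
    intro b
    have ih' := ih (b + 1)
    rw [PySem.Int.floordiv_eq_ediv_of_pos (by norm_num)] at ih' ⊢
    have hdev : Even ((k : Int) * ((k : Int) - 1)) := by
      have h := Int.even_mul_succ_self ((k : Int) - 1)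
      have he : ((k : Int) - 1) * (((k : Int) - 1) + 1) = (k : Int) * ((k : Int) - 1) := by ring
      rwa [he] at h
    have heved : Even (((k : Int) + 1) * (((k : Int) + 1) - 1)) := by
      have h := Int.even_mul_succ_self ((k : Int))
      have he : (k : Int) * ((k : Int) + 1) = ((k : Int) + 1) * (((k : Int) + 1) - 1) := by ring
      rwa [he] at h
    have hd2 : ((k : Int) * ((k : Int) - 1)) / 2 * 2 = (k : Int) * ((k : Int) - 1) :=
      Int.ediv_mul_cancel hdev.two_dvd
    have he2 : (((k : Int) + 1) * (((k : Int) + 1) - 1)) / 2 * 2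
        = ((k : Int) + 1) * (((k : Int) + 1) - 1) :=
      Int.ediv_mul_cancel heved.two_dvd
    simp only [loadOf, ih']
    push_cast
    nlinarith [hd2, he2]

lemma splitOn_hash_free : ∀ (xs : List Char), ∀ s ∈ xs.splitOn '#', '#' ∉ s := by
  intro xs
  induction xs with
  | nil => intro s hs; simp [List.splitOn] at hs; simp [hs]
  | cons c tl ih =>
    intro s hs
    simp only [List.splitOn] at hs ih
    rw [List.splitOnP_cons] at hs
    by_cases hc : (c == '#') = true
    · simp [hc] at hs
      rcases hs with h | h
      · simp [h]
      · exact ih s h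
    · simp [hc] at hs
      obtain ⟨h1, t1, ht⟩ := List.exists_cons_of_ne_nil (List.splitOnP_ne_nil (· == '#') tl)
      rw [ht] at hs
      simp only [List.modifyHead_cons, List.mem_cons] at hs
      rcases hs with h | h
      · subst h
        have hh : '#' ∉ h1 := ih h1 (by rw [ht]; exact List.mem_cons_self)
        have hc' : c ≠ '#' := by simpa using hc
        intro hmem
        rcases List.mem_cons.mp hmem with h | h
        · exact hc' h.symm
        · exact hh h
      · exact ih s (by rw [ht]; exact List.mem_cons_of_mem _ h)

lemma intercalate_cons_of_ne_nil {s : List Char} {ss : List (List Char)} (h : ss ≠ []) :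
    List.intercalate ['#'] (s :: ss) = s ++ '#' :: List.intercalate ['#'] ss := by
  cases ss with
  | nil => exact absurd rfl h
  | cons t ts => simp [List.intercalate, List.intersperse]

lemma seg_step (n : Nat) : ∀ (seg rest : List Char) (i : Nat) (res : List Char) (load : Int),
    '#' ∉ seg →
    tiltLoopA n (seg ++ rest) i res load
      = tiltLoopA n rest (i + seg.length)
          (res ++ List.replicate (seg.count 'O') 'O')
          (load + loadOf n res.length (seg.count 'O')) := by
  intro seg
  induction seg with
  | nil => intro rest i res load _; simp [loadOf]
  | cons c tl ih =>
    intro rest i res load h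
    have hc : c ≠ '#' := fun hcc => h (hcc ▸ List.mem_cons_self)
    have htl : '#' ∉ tl := fun hm => h (List.mem_cons_of_mem _ hm)
    by_cases hO : c = 'O'
    · subst hO
      simp only [List.cons_append, tiltLoopA, if_true]
      rw [ih rest (i + 1) (res ++ ['O']) _ htl]
      rw [show ('O' :: tl).count 'O' = tl.count 'O' + 1 from by simp [List.count_cons]]
      rw [show res ++ List.replicate (tl.count 'O' + 1) 'O'
            = (res ++ ['O']) ++ List.replicate (tl.count 'O') 'O' from by
          simp [List.replicate_succ, List.append_assoc]]
      rw [show i + ('O' :: tl).length = i + 1 + tl.length from by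
          simp only [List.length_cons]; omega]
      congr 1
      rw [show (res ++ ['O']).length = res.length + 1 from by simp]
      simp only [loadOf]
      push_cast
      ring
    · have hcnt : (c :: tl).count 'O' = tl.count 'O' := by
        simp [List.count_cons, hO]
      have hlen : i + (c :: tl).length = i + 1 + tl.length := by
        simp only [List.length_cons]; omega
      by_cases hd : c = '.'
      · subst hd
        simp only [List.cons_append, tiltLoopA, if_neg (by decide : ¬('.' = 'O')), if_true]
        rw [ih rest (i + 1) res load htl, hcnt, hlen]
      · simp only [List.cons_append, tiltLoopA, if_neg hO, if_neg hd, if_neg hc]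
        rw [ih rest (i + 1) res load htl, hcnt, hlen]

lemma segs_step (n : Nat) : ∀ (segs : List (List Char)) (res : List Char) (load : Int),
    (∀ s ∈ segs, '#' ∉ s) → segs ≠ [] →
    n = res.length + (List.intercalate ['#'] segs).length →
    (tiltLoopA n (List.intercalate ['#'] segs) res.length res load).1
        ++ List.replicate
            (n - (tiltLoopA n (List.intercalate ['#'] segs) res.length res load).1.length) '.'
      = res ++ List.intercalate ['#'] (segs.map segPiece)
    ∧ (tiltLoopA n (List.intercalate ['#'] segs) res.length res load).2
      = load + loadSegs n res.length segs := by
  intro segs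
  induction segs with
  | nil => intro _ _ _ h; exact absurd rfl h
  | cons s ss ih =>
    intro res load hfree _ hn
    have hs : '#' ∉ s := hfree s List.mem_cons_self
    have hk : s.count 'O' ≤ s.length := List.count_le_length
    cases hss : ss with
    | nil =>
      subst hss
      have hint : List.intercalate ['#'] [s] = s := by
        simp [List.intercalate, List.intersperse]
      have hint2 : List.intercalate ['#'] ([s].map segPiece) = segPiece s := by
        simp [List.intercalate, List.intersperse]
      rw [hint] at hn ⊢
      have hstep := seg_step n s [] res.length res load hs
      simp only [List.append_nil] at hstep
      rw [hstep]
      simp only [tiltLoopA, hint2]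
      have hlen : (res ++ List.replicate (s.count 'O') 'O').length
          = res.length + s.count 'O' := by simp
      constructor
      · rw [hlen, show n - (res.length + s.count 'O') = s.length - s.count 'O' from by omega,
          List.append_assoc]
        rfl
      · simp [loadSegs]
    | cons t ts =>
      rw [← hss]
      have hssne : ss ≠ [] := by rw [hss]; exact List.cons_ne_nil _ _
      rw [intercalate_cons_of_ne_nil hssne] at hn ⊢
      rw [seg_step n s ('#' :: List.intercalate ['#'] ss) res.length res load hs]
      simp only [tiltLoopA, if_neg (by decide : ¬('#' = 'O')), if_neg (by decide : ¬('#' = '.')),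
        if_true]
      have hlen : (res ++ List.replicate (s.count 'O') 'O').length
          = res.length + s.count 'O' := by simp
      have hpad : res.length + s.length - (res ++ List.replicate (s.count 'O') 'O').length
          = s.length - s.count 'O' := by rw [hlen]; omega
      rw [hpad]
      have hres' : res ++ List.replicate (s.count 'O') 'O'
            ++ (List.replicate (s.length - s.count 'O') '.' ++ ['#'])
          = res ++ (segPiece s ++ ['#']) := by
        simp [segPiece, List.append_assoc]
      rw [hres']
      have hlen' : (res ++ (segPiece s ++ ['#'])).length = res.length + s.length + 1 := by
        simp [segPiece]
        omega
      rw [show res.length + s.length + 1 = (res ++ (segPiece s ++ ['#'])).length from hlen'.symm]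
      have hn' : n = (res ++ (segPiece s ++ ['#'])).length
          + (List.intercalate ['#'] ss).length := by
        rw [hlen']
        simp only [List.length_append, List.length_cons] at hn
        omega
      obtain ⟨ih1, ih2⟩ := ih (res ++ (segPiece s ++ ['#'])) (load + loadOf n res.length (s.count 'O'))
        (fun x hx => hfree x (List.mem_cons_of_mem _ hx)) hssne hn'
      constructor
      · rw [ih1]
        have hmapne : ss.map segPiece ≠ [] := by rw [hss]; simp
        rw [List.map_cons, intercalate_cons_of_ne_nil hmapne]
        simp [List.append_assoc]
      · rw [ih2]
        simp only [loadSegs]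
        rw [hlen']
        ring
  
lemma foldl_loadSegs (n : Nat) : ∀ (segs : List (List Char)) (b : Nat) (l : Int),
    (segs.foldl
      (fun (st : Int × Int) s =>
        (st.1 + (s.length : Int) + 1,
         st.2 + ((s.count 'O' : Int) * ((n : Int) - st.1)
           - PySem.Int.floordiv ((s.count 'O' : Int) * ((s.count 'O' : Int) - 1)) 2)))
      (((b : Nat) : Int), l)).2 = l + loadSegs n b segs := by
  intro segs
  induction segs with
  | nil => intro b l; simp [loadSegs]
  | cons s ss ih =>
    intro b l
    simp only [List.foldl_cons]
    rw [show ((b : Int) + (s.length : Int) + 1) = (((b + s.length + 1 : Nat) : Int)) from by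
      push_cast; ring]
    rw [ih]
    simp only [loadSegs]
    rw [loadOf_closed n (s.count 'O') b]
    ring

-- ===== VERDICT (by name: the statement is the Claim_ definition above) =====
theorem tilt_row_left_spec : Claim_equal_tilt_row_left := by
  intro row _
  unfold Spec_tilt_row_left tilt_row_left tilt_row_left_alt
  dsimp only
  have hne : row.toList.splitOn '#' ≠ [] := List.splitOnP_ne_nil _ row.toList
  have hfree := splitOn_hash_free row.toList
  have hint : List.intercalate ['#'] (row.toList.splitOn '#') = row.toList :=
    List.intercalate_splitOn row.toList '#'
  obtain ⟨h1, h2⟩ := segs_step row.toList.length (row.toList.splitOn '#') [] 0 hfree hne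
    (by rw [hint]; simp)
  rw [hint] at h1 h2
  simp only [List.length_nil, List.nil_append] at h1 h2
  have hfold := foldl_loadSegs row.toList.length (row.toList.splitOn '#') 0 0
  simp only [Nat.cast_zero] at hfold
  refine Prod.ext ?_ ?_
  · dsimp only
    rw [h1]
  · dsimp only
    rw [h2, hfold]
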